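-- pv_equiv track=rewrite | github.com/lukaszmachura/aoc | aoc2309.py | pred_phase1
-- ===== SOURCE A (Python) =====
-- def pred_phase1(L):
--     ret = [L]
--     buf = [1]
--     while any(buf):
--         buf = []
--         for idx in range(len(ret[-1])-1):
--             buf.append(ret[-1][idx+1] - ret[-1][idx])
--         ret.append(buf)
--     return ret
-- ===== SOURCE B (Python) =====
-- def pred_phase1(L):
--     diffs = [b - a for a, b in zip(L, L[1:])]
--     if any(diffs):
--         return [L] + pred_phase1(diffs)
--     return [L, diffs]
-- ===== Notes on version B (the rewrite author's own statement) =====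
-- stated objective: simpler
-- what changed: Replaces the while loop growing an accumulator list (indexing ret[-1] by range) with a direct recursion on the zip-based difference row, concatenating one row per level.
import Mathlib
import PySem

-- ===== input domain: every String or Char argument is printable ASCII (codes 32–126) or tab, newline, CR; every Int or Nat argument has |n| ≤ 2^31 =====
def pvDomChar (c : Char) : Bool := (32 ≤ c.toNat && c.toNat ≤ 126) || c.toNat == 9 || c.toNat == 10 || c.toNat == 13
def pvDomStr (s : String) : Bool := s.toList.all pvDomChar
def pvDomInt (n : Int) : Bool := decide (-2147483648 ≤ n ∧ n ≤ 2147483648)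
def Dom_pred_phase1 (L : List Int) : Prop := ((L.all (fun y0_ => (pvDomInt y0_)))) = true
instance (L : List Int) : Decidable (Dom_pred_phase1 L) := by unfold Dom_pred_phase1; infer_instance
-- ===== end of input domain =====

-- B replaces A's while loop with an accumulator by a direct recursion on the zip-based
-- difference row, concatenating one row per level (objective: simpler).

-- ===== PORT A =====
-- the inner for loop: buf built from the last row by indexing; indices are always
-- in range, so getD 0 is exact here
def predPhase1Diffs (row : List Int) : List Int :=
  (List.range (row.length - 1)).map (fun idx => row.getD (idx + 1) 0 - row.getD idx 0)

theorem predPhase1Diffs_len_lt (row : List Int)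
    (h : (predPhase1Diffs row).any (fun x => x != 0) = true) :
    (predPhase1Diffs row).length < row.length := by
  have hne : predPhase1Diffs row ≠ [] := by
    intro he; rw [he] at h; simp at h
  have hlen : (predPhase1Diffs row).length = row.length - 1 := by
    simp [predPhase1Diffs]
  have hpos : 0 < (predPhase1Diffs row).length := List.length_pos_of_ne_nil hne
  omega

-- the while loop: given the current last row, append difference rows while any is nonzero
def predPhase1Loop (row : List Int) : List (List Int) :=
  let buf := predPhase1Diffs row
  if h : buf.any (fun x => x != 0) then buf :: predPhase1Loop buf
  else [buf]
termination_by row.length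
decreasing_by exact predPhase1Diffs_len_lt row h

-- A enters the loop once unconditionally (buf = [1] initially)
def pred_phase1 (L : List Int) : List (List Int) := L :: predPhase1Loop L

-- ===== PORT B =====
def pred_phase1_alt (L : List Int) : List (List Int) :=
  let diffs := List.zipWith (fun a b => b - a) L L.tail
  if h : diffs.any (fun x => x != 0) then L :: pred_phase1_alt diffs
  else [L, diffs]
termination_by L.length
decreasing_by
  have h' : (List.zipWith (fun a b : Int => b - a) L L.tail).any (fun x => x != 0) = true := h
  have hne : List.zipWith (fun a b : Int => b - a) L L.tail ≠ [] := by
    intro he; rw [he] at h'; simp at h'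
  have hlen : (List.zipWith (fun a b : Int => b - a) L L.tail).length = min L.length L.tail.length := List.length_zipWith
  have hpos : 0 < (List.zipWith (fun a b : Int => b - a) L L.tail).length := List.length_pos_of_ne_nil hne
  have htl := L.length_tail
  omega

-- ===== PRECONDITION & SPEC =====
def Spec_pred_phase1 (L : List Int) (out : List (List Int)) : Prop := out = pred_phase1_alt L
instance (L : List Int) (out : List (List Int)) : Decidable (Spec_pred_phase1 L out) := by unfold Spec_pred_phase1; infer_instance

-- ===== CLAIM (what is proved, stated in full; the proofs are below) =====
def Claim_equal_pred_phase1 : Prop := ∀ (L : List Int), Dom_pred_phase1 L → Spec_pred_phase1 L (pred_phase1 L)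

-- ===== LEMMAS AND PROOFS =====

theorem diffs_eq_zipWith (row : List Int) :
    predPhase1Diffs row = List.zipWith (fun a b => b - a) row row.tail := by
  apply List.ext_getElem
  · simp [predPhase1Diffs, List.length_zipWith]
  · intro i h1 h2
    simp only [predPhase1Diffs, List.getElem_map, List.getElem_range,
      List.getElem_zipWith, List.getElem_tail]
    have hi : i < row.length - 1 := by simpa [predPhase1Diffs] using h1
    rw [List.getD_eq_getElem _ _ (by omega), List.getD_eq_getElem _ _ (by omega)]

theorem loop_eq_alt (row : List Int) : row :: predPhase1Loop row = pred_phase1_alt row := by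
  rw [predPhase1Loop.eq_def, pred_phase1_alt.eq_def]
  simp only [diffs_eq_zipWith]
  split
  · rw [← loop_eq_alt]
  · rfl
termination_by row.length
decreasing_by
  rename_i h
  have := predPhase1Diffs_len_lt row (by rw [diffs_eq_zipWith]; exact h)
  rw [diffs_eq_zipWith] at this
  exact this

-- ===== VERDICT (by name: the statement is the Claim_ definition above) =====
theorem pred_phase1_spec : Claim_equal_pred_phase1 := by
  intro L _
  unfold Spec_pred_phase1 pred_phase1
  exact loop_eq_alt L
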